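-- pv_equiv track=rewrite | github.com/yoyoyo150/jvmonitor | ml/predict_today.py | format_grade_distribution
-- ===== SOURCE A (Python) =====
-- from typing import Any, Dict, Iterable, List, Optional, Set, Tuple
--
-- GRADE_ORDER: Tuple[str, ...] = ("S", "A", "B", "C", "D", "E")
--
-- def format_grade_distribution(grades: Iterable[str], invest_grades: Set[str]) -> str:
--     counts: Dict[str, int] = {}
--     for grade in grades:
--         counts[grade] = counts.get(grade, 0) + 1
--     summary_parts: List[str] = []
--     for grade in GRADE_ORDER:
--         if grade in counts:
--             mark = "*" if grade in invest_grades else ""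
--             summary_parts.append(f"{grade}:{counts[grade]}{mark}")
--     for grade, count in sorted(counts.items()):
--         if grade in GRADE_ORDER:
--             continue
--         mark = "*" if grade in invest_grades else ""
--         summary_parts.append(f"{grade}:{count}{mark}")
--     return ", ".join(summary_parts)
-- ===== SOURCE B (Python) =====
-- from typing import Dict, Iterable, List, Set, Tuple
--
-- GRADE_ORDER: Tuple[str, ...] = ("S", "A", "B", "C", "D", "E")
--
-- def format_grade_distribution(grades: Iterable[str], invest_grades: Set[str]) -> str:
--     counts: Dict[str, int] = {}
--     for grade in grades:
--         counts[grade] = counts.get(grade, 0) + 1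
--     def rank(g: str) -> Tuple[int, str]:
--         return (GRADE_ORDER.index(g) if g in GRADE_ORDER else len(GRADE_ORDER), g)
--     return ", ".join(
--         f"{g}:{counts[g]}{'*' if g in invest_grades else ''}"
--         for g in sorted(counts, key=rank)
--     )
-- ===== Notes on version B (the rewrite author's own statement) =====
-- stated objective: alternative
-- what changed: A's two-phase emission (a fixed pass over GRADE_ORDER, then a pass over sorted(counts.items()) skipping known grades) is replaced by one uniform pass over the distinct grade keys sorted once by a composite key (rank-in-GRADE_ORDER or 6, then the grade string).
import Mathlib
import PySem

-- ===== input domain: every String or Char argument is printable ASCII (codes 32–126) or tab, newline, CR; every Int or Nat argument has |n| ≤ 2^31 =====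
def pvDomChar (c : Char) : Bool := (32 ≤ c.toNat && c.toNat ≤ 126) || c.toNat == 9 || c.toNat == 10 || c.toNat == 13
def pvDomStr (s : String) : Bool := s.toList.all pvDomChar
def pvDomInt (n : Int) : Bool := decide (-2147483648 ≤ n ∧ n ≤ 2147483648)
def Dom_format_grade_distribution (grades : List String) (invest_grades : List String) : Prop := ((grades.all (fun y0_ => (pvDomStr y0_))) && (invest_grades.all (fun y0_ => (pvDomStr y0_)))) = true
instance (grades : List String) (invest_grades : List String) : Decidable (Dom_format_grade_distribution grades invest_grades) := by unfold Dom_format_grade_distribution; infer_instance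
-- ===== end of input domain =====

-- B replaces A's two-phase emission (fixed GRADE_ORDER pass, then a pass over the sorted
-- remaining items) by one pass over the distinct grades sorted once by a composite
-- (rank-in-GRADE_ORDER, grade) key; same asymptotic cost (objective: alternative).

-- the counting loop (phase 1, identical in both Pythons)
def pvCounts (grades : List String) : PySem.Dict String Int :=
  grades.foldl (fun d grade => d.insert grade (d.getD grade 0 + 1)) PySem.Dict.empty

-- the module constant GRADE_ORDER (shared by both Pythons)
def pvGradeOrder : List String := ["S", "A", "B", "C", "D", "E"]

-- the f-string f"{g}:{c}{mark}" with mark = "*" if g in invest_grades else "" (identical in both Pythons)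
def pvFmt (invest_grades : List String) (g : String) (c : Int) : String :=
  PySem.Str.join "" [g, ":", PySem.Int.toStr c, if invest_grades.contains g then "*" else ""]

-- ===== PORT A =====
-- counts[grade] is only read under 'grade in counts', so the guarded lookup is exactly getD.
def format_grade_distribution (grades : List String) (invest_grades : List String) : String :=
  let counts : PySem.Dict String Int := pvCounts grades
  let summary_parts : List String :=
    pvGradeOrder.foldl
      (fun acc grade =>
        if counts.contains grade then acc ++ [pvFmt invest_grades grade (counts.getD grade 0)]
        else acc) []
  let summary_parts :=
    (PySem.List.sorted2 counts.items Prod.fst Prod.snd).foldl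
      (fun acc gc =>
        if pvGradeOrder.contains gc.1 then acc
        else acc ++ [pvFmt invest_grades gc.1 gc.2]) summary_parts
  PySem.Str.join ", " summary_parts

-- ===== PORT B =====
-- rank(g) = (GRADE_ORDER.index(g) if g in GRADE_ORDER else len(GRADE_ORDER), g); the
-- guarded .index is exact as (index? …).getD 0.
def pvRank1 (g : String) : Int :=
  if pvGradeOrder.contains g then (((PySem.List.index? pvGradeOrder g).getD 0 : Nat) : Int) else 6

def format_grade_distribution_alt (grades : List String) (invest_grades : List String) : String :=
  let counts : PySem.Dict String Int := pvCounts grades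
  PySem.Str.join ", "
    ((PySem.List.sorted2 counts.keys pvRank1 (fun g => g)).map
      (fun g => pvFmt invest_grades g (counts.getD g 0)))

-- ===== PRECONDITION & SPEC =====
def Spec_format_grade_distribution (grades : List String) (invest_grades : List String) (out : String) : Prop := out = format_grade_distribution_alt grades invest_grades
instance (grades : List String) (invest_grades : List String) (out : String) : Decidable (Spec_format_grade_distribution grades invest_grades out) := by unfold Spec_format_grade_distribution; infer_instance

-- ===== CLAIM (what is proved, stated in full; the proofs are below) =====
def Claim_equal_format_grade_distribution : Prop := ∀ (grades : List String) (invest_grades : List String), Dom_format_grade_distribution grades invest_grades → Spec_format_grade_distribution grades invest_grades (format_grade_distribution grades invest_grades)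

-- ===== LEMMAS AND PROOFS =====

-- the Boolean comparison sorted2 uses (Python's tuple '<' on the two keys)
def pvLexLt {α κ₁ κ₂ : Type} [LinearOrder κ₁] [LinearOrder κ₂]
    (k1 : α → κ₁) (k2 : α → κ₂) (a b : α) : Bool :=
  decide (k1 a < k1 b) || (!decide (k1 b < k1 a) && decide (k2 a < k2 b))

theorem pvLexLt_iff {α κ₁ κ₂ : Type} [LinearOrder κ₁] [LinearOrder κ₂]
    (k1 : α → κ₁) (k2 : α → κ₂) (a b : α) :
    pvLexLt k1 k2 a b = true ↔ k1 a < k1 b ∨ (k1 a = k1 b ∧ k2 a < k2 b) := by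
  simp only [pvLexLt, Bool.or_eq_true, Bool.and_eq_true, Bool.not_eq_true',
    decide_eq_true_eq, decide_eq_false_iff_not]
  constructor
  · rintro (h | ⟨h1, h2⟩)
    · exact Or.inl h
    · rcases lt_trichotomy (k1 a) (k1 b) with h' | h' | h'
      · exact Or.inl h'
      · exact Or.inr ⟨h', h2⟩
      · exact absurd h' h1
  · rintro (h | ⟨h1, h2⟩)
    · exact Or.inl h
    · exact Or.inr ⟨by rw [h1]; exact lt_irrefl _, h2⟩

theorem pvLexLt_asymm {α κ₁ κ₂ : Type} [LinearOrder κ₁] [LinearOrder κ₂]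
    {k1 : α → κ₁} {k2 : α → κ₂} {a b : α}
    (h : pvLexLt k1 k2 a b = true) : pvLexLt k1 k2 b a = false := by
  rw [pvLexLt_iff] at h
  rw [Bool.eq_false_iff, Ne, pvLexLt_iff]
  rcases h with h | ⟨h1, h2⟩
  · rintro (h' | ⟨h1', _⟩)
    · exact absurd h (lt_asymm h')
    · exact absurd h (h1' ▸ lt_irrefl _)
  · rintro (h' | ⟨_, h2'⟩)
    · exact absurd h' (h1 ▸ lt_irrefl _)
    · exact absurd h2 (lt_asymm h2')

theorem pvLexLt_trans {α κ₁ κ₂ : Type} [LinearOrder κ₁] [LinearOrder κ₂]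
    {k1 : α → κ₁} {k2 : α → κ₂} {a b c : α}
    (hab : pvLexLt k1 k2 a b = true) (hbc : pvLexLt k1 k2 b c = true) :
    pvLexLt k1 k2 a c = true := by
  rw [pvLexLt_iff] at hab hbc ⊢
  rcases hab with h | ⟨h1, h2⟩ <;> rcases hbc with h' | ⟨h1', h2'⟩
  · exact Or.inl (lt_trans h h')
  · exact Or.inl (h1' ▸ h)
  · exact Or.inl (h1 ▸ h')
  · exact Or.inr ⟨h1.trans h1', lt_trans h2 h2'⟩

-- insertion by pvLexLt preserves 'sortedness' (the relation "not strictly after")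
theorem pvInsertBy_pairwise {α κ₁ κ₂ : Type} [LinearOrder κ₁] [LinearOrder κ₂]
    (k1 : α → κ₁) (k2 : α → κ₂) (x : α) (ys : List α)
    (h : ys.Pairwise (fun a b => pvLexLt k1 k2 b a = false)) :
    (PySem.List.insertBy (pvLexLt k1 k2) x ys).Pairwise
      (fun a b => pvLexLt k1 k2 b a = false) := by
  induction ys with
  | nil => simp [PySem.List.insertBy]
  | cons y ys ih =>
    rw [List.pairwise_cons] at h
    obtain ⟨hy, hys⟩ := h
    rw [PySem.List.insertBy]
    by_cases hxy : pvLexLt k1 k2 x y = true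
    · simp only [hxy, if_true]
      rw [List.pairwise_cons]
      refine ⟨?_, by rw [List.pairwise_cons]; exact ⟨hy, hys⟩⟩
      intro z hz
      rcases List.mem_cons.mp hz with rfl | hz'
      · exact pvLexLt_asymm hxy
      · -- if z were before x, transitivity would put z before y, contradicting hy
        rw [Bool.eq_false_iff]; intro hzx
        have := pvLexLt_trans hzx hxy
        rw [hy z hz'] at this; exact Bool.false_ne_true this
    · rw [if_neg hxy]
      rw [List.pairwise_cons]
      refine ⟨?_, ih hys⟩
      intro z hz
      rcases (PySem.List.mem_insertBy _ _ _ _).mp hz with rfl | hz'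
      · exact Bool.eq_false_iff.mpr hxy
      · exact hy z hz'

theorem pvFoldlInsert_pairwise {α κ₁ κ₂ : Type} [LinearOrder κ₁] [LinearOrder κ₂]
    (k1 : α → κ₁) (k2 : α → κ₂) (xs acc : List α)
    (h : acc.Pairwise (fun a b => pvLexLt k1 k2 b a = false)) :
    (xs.foldl (fun acc x => PySem.List.insertBy (pvLexLt k1 k2) x acc) acc).Pairwise
      (fun a b => pvLexLt k1 k2 b a = false) := by
  induction xs generalizing acc with
  | nil => exact h
  | cons x xs ih => exact ih _ (pvInsertBy_pairwise k1 k2 x acc h)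

-- the characterisation of sorted2 this file's proof runs on: any rearrangement of xs that is
-- strictly increasing in the lexicographic (k1, k2) key IS sorted2(xs, k1, k2), provided the
-- two keys jointly separate elements
theorem pvSorted2_eq {α κ₁ κ₂ : Type} [LinearOrder κ₁] [LinearOrder κ₂]
    (k1 : α → κ₁) (k2 : α → κ₂)
    (hinj : ∀ a b : α, k1 a = k1 b → k2 a = k2 b → a = b)
    (xs ys : List α) (hperm : ys.Perm xs)
    (hpair : ys.Pairwise (fun a b => k1 a < k1 b ∨ (k1 a = k1 b ∧ k2 a < k2 b))) :
    PySem.List.sorted2 xs k1 k2 = ys := by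
  have hunf : PySem.List.sorted2 xs k1 k2 =
      xs.foldl (fun acc x => PySem.List.insertBy (pvLexLt k1 k2) x acc) [] := rfl
  apply List.Perm.eq_of_pairwise (le := fun a b => pvLexLt k1 k2 b a = false)
  · intro a b _ _ hab hba
    rw [Bool.eq_false_iff, Ne, pvLexLt_iff] at hab hba
    simp only [not_or, not_and, not_lt] at hab hba
    have h1 : k1 a = k1 b := le_antisymm hab.1 hba.1
    exact hinj a b h1 (le_antisymm (hab.2 h1.symm) (hba.2 h1))
  · rw [hunf]; exact pvFoldlInsert_pairwise k1 k2 xs [] List.Pairwise.nil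
  · refine hpair.imp ?_
    intro a b h
    exact pvLexLt_asymm ((pvLexLt_iff k1 k2 a b).mpr h)
  · exact ((PySem.List.sorted2_perm xs k1 k2 false).trans hperm.symm)

theorem pvCounts_nodup (grades : List String) : (pvCounts grades).keys.Nodup :=
  PySem.Dict.nodup_keys_foldl_insert grades (fun d g => d.getD g 0 + 1) PySem.Dict.empty
    PySem.Dict.nodup_keys_empty

-- the distinct keys sorted by plain string order, strictly
theorem pvSortedStr_pairwise_lt (grades : List String) :
    (PySem.List.sorted (pvCounts grades).keys (fun g => g)).Pairwise (· < ·) := by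
  have h1 := PySem.List.sorted_pairwise (pvCounts grades).keys (fun g => g)
  have h2 : (PySem.List.sorted (pvCounts grades).keys (fun g => g)).Nodup :=
    ((PySem.List.sorted_perm (pvCounts grades).keys (fun g => g) false).symm).nodup
      (pvCounts_nodup grades)
  exact (h1.and h2).imp (fun h => lt_of_le_of_ne h.1 h.2)

-- A's sorted items are exactly the string-sorted keys, each paired with its count
theorem pvItems_sorted (grades : List String) :
    PySem.List.sorted2 (pvCounts grades).items Prod.fst Prod.snd =
      (PySem.List.sorted (pvCounts grades).keys (fun g => g)).map
        (fun g => (g, (pvCounts grades).getD g 0)) := by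
  apply pvSorted2_eq
  · intro a b h1 h2; exact Prod.ext h1 h2
  · rw [PySem.Dict.items_eq_map_keys (pvCounts grades) (pvCounts_nodup grades) 0]
    exact (PySem.List.sorted_perm _ _ _).map _
  · exact (pvSortedStr_pairwise_lt grades).map _ (fun a b h => Or.inl h)

-- B's composite-key sort splits into the GRADE_ORDER part followed by the rest
theorem pvKeys_sorted (grades : List String) :
    PySem.List.sorted2 (pvCounts grades).keys pvRank1 (fun g => g) =
      pvGradeOrder.filter (fun g => (pvCounts grades).contains g) ++
      (PySem.List.sorted (pvCounts grades).keys (fun g => g)).filter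
        (fun g => !pvGradeOrder.contains g) := by
  apply pvSorted2_eq
  · intro a b _ h2; exact h2
  · -- permutation with the key list
    have hGOF : (pvGradeOrder.filter (fun g => (pvCounts grades).contains g)).Perm
        ((pvCounts grades).keys.filter (fun g => pvGradeOrder.contains g)) := by
      apply List.perm_of_nodup_nodup_toFinset_eq
      · exact (by decide : pvGradeOrder.Nodup).filter _
      · exact (pvCounts_nodup grades).filter _
      · ext g
        simp only [List.mem_toFinset, List.mem_filter, List.contains_iff_mem,
          PySem.Dict.contains_iff_mem_keys]
        exact and_comm
    have hUF : ((PySem.List.sorted (pvCounts grades).keys (fun g => g)).filter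
        (fun g => !pvGradeOrder.contains g)).Perm
        ((pvCounts grades).keys.filter (fun g => !pvGradeOrder.contains g)) :=
      (PySem.List.sorted_perm _ _ _).filter _
    exact (hGOF.append hUF).trans
      (List.filter_append_perm (fun g => pvGradeOrder.contains g) (pvCounts grades).keys)
  · -- strictly increasing in the lexicographic (pvRank1, id) key
    rw [List.pairwise_append]
    refine ⟨?_, ?_, ?_⟩
    · refine List.Pairwise.sublist List.filter_sublist ?_
      decide
    · refine List.Pairwise.imp_of_mem ?_ ((pvSortedStr_pairwise_lt grades).filter _)
      intro a b ha hb h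
      have ha' : a ∉ pvGradeOrder := by simpa using (List.mem_filter.mp ha).2
      have hb' : b ∉ pvGradeOrder := by simpa using (List.mem_filter.mp hb).2
      right
      exact ⟨by simp [pvRank1, ha', hb'], h⟩
    · intro a ha b hb
      have ha' := List.mem_filter.mp ha
      have hb' : b ∉ pvGradeOrder := by simpa using (List.mem_filter.mp hb).2
      left
      have hlt : ∀ g ∈ pvGradeOrder, pvRank1 g < 6 := by decide
      have h6 : pvRank1 b = 6 := by simp [pvRank1, hb']
      rw [h6]
      exact hlt a (by simpa using ha'.1)

theorem format_grade_distribution_eq (grades invest_grades : List String) :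
    format_grade_distribution grades invest_grades =
      format_grade_distribution_alt grades invest_grades := by
  show PySem.Str.join ", " _ = PySem.Str.join ", " _
  congr 1
  -- A's first loop: appends over GRADE_ORDER
  rw [PySem.List.foldl_append_if (fun g => (pvCounts grades).contains g)
      (fun g => pvFmt invest_grades g ((pvCounts grades).getD g 0)) pvGradeOrder []]
  -- A's second loop: flip the branch order, then it is an append-if loop
  have hswap : (fun (acc : List String) (gc : String × Int) =>
      if pvGradeOrder.contains gc.1 then acc
      else acc ++ [pvFmt invest_grades gc.1 gc.2]) =
      (fun acc gc =>
        if (!pvGradeOrder.contains gc.1) = true then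
          acc ++ [pvFmt invest_grades gc.1 gc.2]
        else acc) := by
    funext acc gc
    cases h : pvGradeOrder.contains gc.1 <;> simp only [h, Bool.not_false, Bool.not_true,
      if_true, if_false, Bool.false_eq_true]
  rw [hswap, PySem.List.foldl_append_if (fun gc : String × Int => !pvGradeOrder.contains gc.1)
    (fun gc : String × Int => pvFmt invest_grades gc.1 gc.2)]
  rw [pvItems_sorted, pvKeys_sorted, List.nil_append, List.filter_map, List.map_map,
    List.map_append]
  rfl

-- ===== VERDICT (by name: the statement is the Claim_ definition above) =====
theorem format_grade_distribution_spec : Claim_equal_format_grade_distribution := by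
  intro grades invest_grades _
  show _ = _
  exact format_grade_distribution_eq grades invest_grades
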